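-- pv_equiv track=rewrite | github.com/manuelescobar-dev/Computational-Intelligence | labs/lab10/scripts/tictactoe.py | state_to_index
-- ===== SOURCE A (Python) =====
-- X = "X"
--
-- O = "O"
--
-- def state_to_index(state):
--     index = 0
--     factor = 1
--
--     # Flatten the 3x3 board and convert to decimal
--     for row in state:
--         for cell in row:
--             if cell == X:
--                 i = 1
--             elif cell == O:
--                 i = 2
--             else:
--                 i = 0
--             index += factor * i
--             factor *= 3
--
--     return index
-- ===== SOURCE B (Python) =====
-- def state_to_index(state):
--     index = 0
--     for row in reversed(state):
--         for cell in reversed(row):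
--             index = index * 3 + (1 if cell == "X" else 2 if cell == "O" else 0)
--     return index
-- ===== Notes on version B (the rewrite author's own statement) =====
-- stated objective: faster
-- what changed: Replaces the two-variable little-endian accumulation (index, factor with factor *= 3) by Horner's method over the cells in reverse order, keeping a single accumulator index = index*3 + digit.
import Mathlib
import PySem

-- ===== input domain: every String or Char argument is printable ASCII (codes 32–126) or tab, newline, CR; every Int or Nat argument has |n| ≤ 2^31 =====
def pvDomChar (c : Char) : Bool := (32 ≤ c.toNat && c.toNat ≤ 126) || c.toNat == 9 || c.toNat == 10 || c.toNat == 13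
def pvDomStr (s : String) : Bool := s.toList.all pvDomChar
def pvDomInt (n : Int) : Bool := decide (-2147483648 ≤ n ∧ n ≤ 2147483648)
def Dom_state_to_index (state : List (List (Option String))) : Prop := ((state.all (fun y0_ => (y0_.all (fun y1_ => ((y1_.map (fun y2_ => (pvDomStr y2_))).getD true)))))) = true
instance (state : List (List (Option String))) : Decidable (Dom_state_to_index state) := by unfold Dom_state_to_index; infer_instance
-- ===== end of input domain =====

-- ===== PORT A =====
-- Header: B replaces A's (index, factor) little-endian accumulation by Horner's method
-- over the cells in reverse order (single accumulator); same return value.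
def state_to_index (state : List (List (Option String))) : Int :=
  (state.foldl (fun (acc : Int × Int) row =>
    row.foldl (fun (acc : Int × Int) cell =>
      let i : Int := if cell = some "X" then 1 else if cell = some "O" then 2 else 0
      (acc.1 + acc.2 * i, acc.2 * 3)) acc) ((0 : Int), (1 : Int))).1

-- ===== PORT B =====
def state_to_index_alt (state : List (List (Option String))) : Int :=
  state.reverse.foldl (fun (idx : Int) row =>
    row.reverse.foldl (fun (idx : Int) cell =>
      idx * 3 + (if cell = some "X" then 1 else if cell = some "O" then 2 else 0)) idx) 0

-- ===== PRECONDITION & SPEC =====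
def Spec_state_to_index (state : List (List (Option String))) (out : Int) : Prop := out = state_to_index_alt state
instance (state : List (List (Option String))) (out : Int) : Decidable (Spec_state_to_index state out) := by unfold Spec_state_to_index; infer_instance

-- ===== CLAIM (what is proved, stated in full; the proofs are below) =====
def Claim_equal_state_to_index : Prop := ∀ (state : List (List (Option String))), Dom_state_to_index state → Spec_state_to_index state (state_to_index state)

-- ===== LEMMAS AND PROOFS =====

-- ===== VERDICT (by name: the statement is the Claim_ definition above) =====
-- little-endian base-3 value of a row / of the whole board
def pvDigit (cell : Option String) : Int :=
  if cell = some "X" then 1 else if cell = some "O" then 2 else 0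

def pvRowVal : List (Option String) → Int
  | [] => 0
  | c :: cs => pvDigit c + 3 * pvRowVal cs

def pvBoardVal : List (List (Option String)) → Int
  | [] => 0
  | r :: rs => pvRowVal r + (3 : Int) ^ r.length * pvBoardVal rs

theorem rowA (row : List (Option String)) (i f : Int) :
    row.foldl (fun (acc : Int × Int) cell =>
      let d : Int := if cell = some "X" then 1 else if cell = some "O" then 2 else 0
      (acc.1 + acc.2 * d, acc.2 * 3)) ((i : Int), (f : Int))
    = (i + f * pvRowVal row, f * (3 : Int) ^ row.length) := by
  induction row generalizing i f with
  | nil => simp [pvRowVal]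
  | cons c cs ih =>
    simp only [List.foldl_cons, ih, pvRowVal, pvDigit, List.length_cons, pow_succ,
      Prod.mk.injEq]
    constructor <;> ring

theorem boardA (state : List (List (Option String))) (i f : Int) :
    state.foldl (fun (acc : Int × Int) row =>
      row.foldl (fun (acc : Int × Int) cell =>
        let d : Int := if cell = some "X" then 1 else if cell = some "O" then 2 else 0
        (acc.1 + acc.2 * d, acc.2 * 3)) acc) (i, f)
    = (i + f * pvBoardVal state, f * (3 : Int) ^ (state.map List.length).sum) := by
  induction state generalizing i f with
  | nil => simp [pvBoardVal]
  | cons r rs ih =>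
    simp only [List.foldl_cons, rowA, ih, pvBoardVal, List.map_cons, List.sum_cons, pow_add,
      Prod.mk.injEq]
    constructor <;> ring

theorem rowB (row : List (Option String)) (idx : Int) :
    row.reverse.foldl (fun (idx : Int) cell =>
      idx * 3 + (if cell = some "X" then 1 else if cell = some "O" then 2 else 0)) idx
    = idx * (3 : Int) ^ row.length + pvRowVal row := by
  induction row generalizing idx with
  | nil => simp [pvRowVal]
  | cons c cs ih =>
    simp only [List.reverse_cons, List.foldl_append, List.foldl_cons, List.foldl_nil, ih,
      pvRowVal, pvDigit, List.length_cons, pow_succ]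
    ring

theorem boardB (state : List (List (Option String))) (idx : Int) :
    state.reverse.foldl (fun (idx : Int) row =>
      row.reverse.foldl (fun (idx : Int) cell =>
        idx * 3 + (if cell = some "X" then 1 else if cell = some "O" then 2 else 0)) idx) idx
    = idx * (3 : Int) ^ (state.map List.length).sum + pvBoardVal state := by
  induction state generalizing idx with
  | nil => simp [pvBoardVal]
  | cons r rs ih =>
    rw [List.reverse_cons, List.foldl_append]
    simp only [List.foldl_cons, List.foldl_nil]
    rw [ih, rowB]
    simp only [pvBoardVal, List.map_cons, List.sum_cons, pow_add]
    ring

-- ===== VERDICT (by name: the statement is the Claim_ definition above) =====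
theorem state_to_index_spec : Claim_equal_state_to_index := by
  intro state _
  unfold Spec_state_to_index state_to_index state_to_index_alt
  rw [boardA, boardB]
  simp
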